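-- pv_equiv track=rewrite | github.com/codereport/Advent-of-Code-2023 | day03.py | symbols_adj_to
-- ===== SOURCE A (Python) =====
-- def is_symbol(grid, row, col) -> bool:
--     if row < 0 or row >= len(grid) or col < 0 or col >= len(grid[row]):
--         return False
--     return not grid[row][col].isdigit() and grid[row][col] != "."
--
-- def symbols_adj_to(grid, num) -> list[(str, int, int)]:
--     n, row, a, b = num
--     adj_to = set()
--     dx = [1, 1, 1,  0, -1, -1, -1,  0]
--     dy = [1, 0, -1, 1,  1,  0, -1, -1]
--     for col in range(a, b + 1):
--         for x, y in zip(dx, dy):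
--             if is_symbol(grid, row + x, col + y):
--                 adj_to.add((grid[row + x][col + y], row + x, col + y, n))
--     return adj_to
-- ===== SOURCE B (Python) =====
-- def is_symbol(grid, row, col) -> bool:
--     if row < 0 or row >= len(grid) or col < 0 or col >= len(grid[row]):
--         return False
--     return not grid[row][col].isdigit() and grid[row][col] != "."
--
-- def symbols_adj_to(grid, num) -> list[(str, int, int)]:
--     # Single rectangular scan of the bounding box rows row-1..row+1, cols a-1..b+1.
--     # Every box cell is adjacent to some span cell, except the span's own cell
--     # when the span has length 1 (a == b), which is skipped.
--     n, row, a, b = num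
--     if b < a:
--         return set()
--     adj_to = set()
--     for r in range(row - 1, row + 2):
--         for c in range(a - 1, b + 2):
--             if a == b and r == row and c == a:
--                 continue
--             if is_symbol(grid, r, c):
--                 adj_to.add((grid[r][c], r, c, n))
--     return adj_to
-- ===== Notes on version B (the rewrite author's own statement) =====
-- stated objective: simpler
-- what changed: B replaces A's per-span-cell loop over two parallel 8-offset lists (dx/dy zipped) by a single rectangular scan of the neighbor bounding box rows row-1..row+1 and cols a-1..b+1, skipping only the span's own cell when the span has length 1; the resulting set is identical.
import Mathlib
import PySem

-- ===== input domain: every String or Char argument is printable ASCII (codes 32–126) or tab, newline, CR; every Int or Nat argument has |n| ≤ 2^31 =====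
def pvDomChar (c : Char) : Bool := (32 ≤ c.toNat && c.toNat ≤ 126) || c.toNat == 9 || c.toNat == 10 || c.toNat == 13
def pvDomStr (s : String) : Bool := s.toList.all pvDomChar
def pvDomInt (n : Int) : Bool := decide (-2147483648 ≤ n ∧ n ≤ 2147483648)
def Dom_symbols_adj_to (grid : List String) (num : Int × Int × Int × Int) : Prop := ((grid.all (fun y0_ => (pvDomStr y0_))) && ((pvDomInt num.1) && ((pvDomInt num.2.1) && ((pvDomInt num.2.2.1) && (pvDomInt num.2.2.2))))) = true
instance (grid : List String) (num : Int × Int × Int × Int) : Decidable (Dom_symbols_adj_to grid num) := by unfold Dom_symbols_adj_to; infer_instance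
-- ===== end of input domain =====

-- B replaces A's per-column loop over eight (dx,dy) offset lists by one rectangular scan of the
-- bounding box (skipping only the span's own cell of a length-1 span): same result set, simpler loops.
-- Both Pythons return a SET (unordered); each port returns the canonical representative of its set,
-- its elements sorted by the injective-on-the-set (row, col) key pvKey.

-- ===== PORT A =====
-- shared helper: port of is_symbol (used verbatim by both Pythons)
def pvCell (grid : List String) (row col : Int) : String :=
  match PySem.Str.pyGet? (PySem.List.pyGetD grid row "") col with
  | some ch => String.ofList [ch]
  | none => ""

def pvIsSymbol (grid : List String) (row col : Int) : Bool :=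
  if row < 0 || (grid.length : Int) ≤ row then false
  else if col < 0 || PySem.Str.len (PySem.List.pyGetD grid row "") ≤ col then false
  else !(PySem.Str.strIsdigit (pvCell grid row col)) && !(pvCell grid row col == ".")

-- canonical key for the returned set's representative list (injective on each result set)
def pvKey (x : String × Int × Int × Int) : Int := x.2.1 * 1099511627776 + x.2.2.1

def symbols_adj_to (grid : List String) (num : Int × Int × Int × Int) : List (String × Int × Int × Int) :=
  let n := num.1
  let row := num.2.1
  let a := num.2.2.1
  let b := num.2.2.2
  let dx : List Int := [1, 1, 1, 0, -1, -1, -1, 0]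
  let dy : List Int := [1, 0, -1, 1, 1, 0, -1, -1]
  let adj_to : PySem.Set (String × Int × Int × Int) :=
    (PySem.List.pyRange a (b + 1)).foldl (fun s col =>
      (dx.zip dy).foldl (fun s d =>
        if pvIsSymbol grid (row + d.1) (col + d.2) then
          PySem.Set.add s (pvCell grid (row + d.1) (col + d.2), row + d.1, col + d.2, n)
        else s) s) PySem.Set.empty
  PySem.List.sorted adj_to pvKey false

-- ===== PORT B =====
def symbols_adj_to_alt (grid : List String) (num : Int × Int × Int × Int) : List (String × Int × Int × Int) :=
  let n := num.1
  let row := num.2.1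
  let a := num.2.2.1
  let b := num.2.2.2
  if b < a then []
  else
    let adj_to : PySem.Set (String × Int × Int × Int) :=
      (PySem.List.pyRange (row - 1) (row + 2)).foldl (fun s r =>
        (PySem.List.pyRange (a - 1) (b + 2)).foldl (fun s c =>
          if a == b && r == row && c == a then s
          else if pvIsSymbol grid r c then
            PySem.Set.add s (pvCell grid r c, r, c, n)
          else s) s) PySem.Set.empty
    PySem.List.sorted adj_to pvKey false

-- ===== PRECONDITION & SPEC =====
def Spec_symbols_adj_to (grid : List String) (num : Int × Int × Int × Int) (out : List (String × Int × Int × Int)) : Prop := out = symbols_adj_to_alt grid num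
instance (grid : List String) (num : Int × Int × Int × Int) (out : List (String × Int × Int × Int)) : Decidable (Spec_symbols_adj_to grid num out) := by unfold Spec_symbols_adj_to; infer_instance

-- ===== CLAIM (what is proved, stated in full; the proofs are below) =====
def Claim_equal_symbols_adj_to : Prop := ∀ (grid : List String) (num : Int × Int × Int × Int), Dom_symbols_adj_to grid num → Spec_symbols_adj_to grid num (symbols_adj_to grid num)

-- ===== LEMMAS AND PROOFS =====

def pvOffsets : List (Int × Int) := [(1,1),(1,0),(1,-1),(0,1),(-1,1),(-1,0),(-1,-1),(0,-1)]

def pvTup (grid : List String) (n r c : Int) : String × Int × Int × Int := (pvCell grid r c, r, c, n)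

lemma pv_mem_foldl {α β : Type} (step : List α → β → List α) (Q : β → α → Prop)
    (h : ∀ s i x, x ∈ step s i ↔ x ∈ s ∨ Q i x) (l : List β) (s : List α) (x : α) :
    x ∈ l.foldl step s ↔ x ∈ s ∨ ∃ i ∈ l, Q i x := by
  induction l generalizing s with
  | nil => simp
  | cons i t ih =>
    simp only [List.foldl_cons, ih, h, List.mem_cons]
    constructor
    · rintro ((hx | hq) | ⟨j, hj, hqj⟩)
      · exact Or.inl hx
      · exact Or.inr ⟨i, Or.inl rfl, hq⟩
      · exact Or.inr ⟨j, Or.inr hj, hqj⟩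
    · rintro (hx | ⟨j, (rfl | hj), hqj⟩)
      · exact Or.inl (Or.inl hx)
      · exact Or.inl (Or.inr hqj)
      · exact Or.inr ⟨j, hj, hqj⟩

lemma pv_nodup_foldl {α β : Type} (step : List α → β → List α)
    (h : ∀ s i, s.Nodup → (step s i).Nodup) (l : List β) (s : List α) (hs : s.Nodup) :
    (l.foldl step s).Nodup := by
  induction l generalizing s with
  | nil => simpa
  | cons i t ih => exact ih _ (h s i hs)

lemma pv_sorted_eq {α : Type} (key : α → Int) (xs ys : List α)
    (hperm : xs.Perm ys) (hnd : (xs.map key).Nodup) :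
    PySem.List.sorted xs key false = PySem.List.sorted ys key false := by
  have h1 : (PySem.List.sorted xs key false).Perm ys :=
    (PySem.List.sorted_perm xs key false).trans hperm
  have hps := PySem.List.sorted_pairwise xs key
  have hnd' : ((PySem.List.sorted xs key false).map key).Nodup :=
    (((PySem.List.sorted_perm xs key false).map key).nodup_iff).mpr hnd
  have hne : (PySem.List.sorted xs key false).Pairwise (fun a b => key a ≠ key b) :=
    List.pairwise_map.mp hnd'
  have hlt : (PySem.List.sorted xs key false).Pairwise (fun a b => key a < key b) :=
    (hps.and hne).imp (fun h => lt_of_le_of_ne h.1 h.2)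
  exact (PySem.List.sorted_eq_of_perm_of_pairwise_lt ys (PySem.List.sorted xs key false) key h1 hlt).symm

-- the coordinate sets examined by A (union of 8-neighborhoods of the span cells) and by B
-- (the bounding box minus the span cell of a length-1 span) coincide when a ≤ b
lemma pv_cov (row a b r c : Int) (hab : a ≤ b) :
    (∃ col, (a ≤ col ∧ col < b + 1) ∧ ∃ d ∈ pvOffsets, r = row + d.1 ∧ c = col + d.2) ↔
    ((row - 1 ≤ r ∧ r < row + 2) ∧ (a - 1 ≤ c ∧ c < b + 2) ∧ ¬(a = b ∧ r = row ∧ c = a)) := by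
  constructor
  · rintro ⟨col, ⟨h1, h2⟩, ⟨d1, d2⟩, hd, hr, hc⟩
    simp only [pvOffsets, List.mem_cons, List.not_mem_nil, or_false, Prod.mk.injEq] at hd
    dsimp only at hr hc
    omega
  · rintro ⟨⟨hr1, hr2⟩, ⟨hc1, hc2⟩, hskip⟩
    by_cases hrr : r = row
    · by_cases h1 : c < a
      · exact ⟨a, ⟨le_refl a, by omega⟩, ⟨(0, -1), by simp [pvOffsets], by dsimp only; omega,
          by dsimp only; omega⟩⟩
      · by_cases h2 : b < c
        · exact ⟨b, ⟨hab, by omega⟩, ⟨(0, 1), by simp [pvOffsets], by dsimp only; omega,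
            by dsimp only; omega⟩⟩
        · by_cases h3 : c = a
          · have hne : a ≠ b := fun h => hskip ⟨h, hrr, h3⟩
            exact ⟨a + 1, ⟨by omega, by omega⟩, ⟨(0, -1), by simp [pvOffsets], by dsimp only; omega,
              by dsimp only; omega⟩⟩
          · exact ⟨c - 1, ⟨by omega, by omega⟩, ⟨(0, 1), by simp [pvOffsets], by dsimp only; omega,
              by dsimp only; omega⟩⟩
    · by_cases h1 : c < a
      · refine ⟨a, ⟨le_refl a, by omega⟩, ⟨(r - row, c - a), ?_, by dsimp only; omega,
          by dsimp only; omega⟩⟩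
        have hca : c - a = -1 := by omega
        rcases (by omega : r - row = 1 ∨ r - row = -1) with h | h <;> rw [h, hca] <;>
          simp [pvOffsets]
      · by_cases h2 : b < c
        · refine ⟨b, ⟨hab, by omega⟩, ⟨(r - row, c - b), ?_, by dsimp only; omega,
            by dsimp only; omega⟩⟩
          have hcb : c - b = 1 := by omega
          rcases (by omega : r - row = 1 ∨ r - row = -1) with h | h <;> rw [h, hcb] <;>
            simp [pvOffsets]
        · refine ⟨c, ⟨by omega, by omega⟩, ⟨(r - row, 0), ?_, by dsimp only; omega,
            by dsimp only; omega⟩⟩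
          rcases (by omega : r - row = 1 ∨ r - row = -1) with h | h <;> rw [h] <;>
            simp [pvOffsets]

-- membership in A's accumulated set
lemma pv_memA (grid : List String) (n row a b : Int) (x : String × Int × Int × Int) :
    x ∈ (PySem.List.pyRange a (b + 1)).foldl (fun s col =>
        (pvOffsets).foldl (fun s d =>
          if pvIsSymbol grid (row + d.1) (col + d.2) then
            PySem.Set.add s (pvCell grid (row + d.1) (col + d.2), row + d.1, col + d.2, n)
          else s) s) PySem.Set.empty ↔
      ∃ col, (a ≤ col ∧ col < b + 1) ∧ ∃ d ∈ pvOffsets,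
        pvIsSymbol grid (row + d.1) (col + d.2) = true ∧ x = pvTup grid n (row + d.1) (col + d.2) := by
  rw [pv_mem_foldl _ (fun col x => ∃ d ∈ pvOffsets,
        pvIsSymbol grid (row + d.1) (col + d.2) = true ∧ x = pvTup grid n (row + d.1) (col + d.2))]
  · simp [PySem.Set.empty, PySem.List.mem_pyRange_one]
  · intro s col y
    rw [pv_mem_foldl _ (fun d y =>
        pvIsSymbol grid (row + d.1) (col + d.2) = true ∧ y = pvTup grid n (row + d.1) (col + d.2))]
    intro s' d z
    by_cases hc : pvIsSymbol grid (row + d.1) (col + d.2) = true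
    · simp [hc, PySem.Set.mem_add, pvTup]
    · simp [hc]

-- membership in B's accumulated set
lemma pv_memB (grid : List String) (n row a b : Int) (x : String × Int × Int × Int) :
    x ∈ (PySem.List.pyRange (row - 1) (row + 2)).foldl (fun s r =>
        (PySem.List.pyRange (a - 1) (b + 2)).foldl (fun s c =>
          if a == b && r == row && c == a then s
          else if pvIsSymbol grid r c then
            PySem.Set.add s (pvCell grid r c, r, c, n)
          else s) s) PySem.Set.empty ↔
      ∃ r, (row - 1 ≤ r ∧ r < row + 2) ∧ ∃ c, (a - 1 ≤ c ∧ c < b + 2) ∧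
        ¬(a = b ∧ r = row ∧ c = a) ∧ pvIsSymbol grid r c = true ∧ x = pvTup grid n r c := by
  rw [pv_mem_foldl _ (fun r x => ∃ c, (a - 1 ≤ c ∧ c < b + 2) ∧
        ¬(a = b ∧ r = row ∧ c = a) ∧ pvIsSymbol grid r c = true ∧ x = pvTup grid n r c)]
  · simp [PySem.Set.empty, PySem.List.mem_pyRange_one]
  · intro s r y
    rw [pv_mem_foldl _ (fun c y =>
        ¬(a = b ∧ r = row ∧ c = a) ∧ pvIsSymbol grid r c = true ∧ y = pvTup grid n r c)]
    · simp [PySem.List.mem_pyRange_one]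
    · intro s' c z
      by_cases hskip : (a == b && r == row && c == a) = true
      · rw [if_pos hskip]
        simp only [Bool.and_eq_true, beq_iff_eq] at hskip
        constructor
        · exact fun hz => Or.inl hz
        · rintro (hz | ⟨hns, _, _⟩)
          · exact hz
          · exact absurd ⟨hskip.1.1, hskip.1.2, hskip.2⟩ hns
      · rw [if_neg hskip]
        by_cases hc : pvIsSymbol grid r c = true
        · rw [if_pos hc, PySem.Set.mem_add]
          constructor
          · rintro (hz | rfl)
            · exact Or.inl hz
            · refine Or.inr ⟨?_, hc, rfl⟩
              simp only [Bool.and_eq_true, beq_iff_eq] at hskip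
              tauto
          · rintro (hz | ⟨_, _, rfl⟩)
            · exact Or.inl hz
            · exact Or.inr rfl
        · rw [if_neg hc]
          constructor
          · exact fun hz => Or.inl hz
          · rintro (hz | ⟨_, hcs, _⟩)
            · exact hz
            · exact absurd hcs hc

lemma pv_nodup_if_add {α : Type} [BEq α] [LawfulBEq α] {β : Type}
    (p : β → Bool) (f : β → α) (l : List β) (s : List α) (hs : s.Nodup) :
    (l.foldl (fun s i => if p i then PySem.Set.add s (f i) else s) s).Nodup := by
  refine pv_nodup_foldl _ (fun s i hsn => ?_) l s hs
  by_cases hp : p i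
  · simpa [hp] using PySem.Set.nodup_add s (f i) hsn
  · simpa [hp]

-- ===== VERDICT (by name: the statement is the Claim_ definition above) =====
theorem symbols_adj_to_spec : Claim_equal_symbols_adj_to := by
  intro grid num hdom
  obtain ⟨n, row, a, b⟩ := num
  simp only [Dom_symbols_adj_to, Bool.and_eq_true, pvDomInt, decide_eq_true_eq] at hdom
  obtain ⟨-, hn, hrow, ha, hb⟩ := hdom
  unfold Spec_symbols_adj_to symbols_adj_to symbols_adj_to_alt
  dsimp only
  have hzip : (([1, 1, 1, 0, -1, -1, -1, 0] : List Int).zip ([1, 0, -1, 1, 1, 0, -1, -1] : List Int))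
      = pvOffsets := rfl
  rw [hzip]
  by_cases hab : b < a
  · rw [if_pos hab, PySem.List.pyRange_one_eq_nil (by omega : b + 1 ≤ a)]
    rfl
  · rw [if_neg hab]
    have hab' : a ≤ b := by omega
    set SA := (PySem.List.pyRange a (b + 1)).foldl (fun s col =>
        (pvOffsets).foldl (fun s d =>
          if pvIsSymbol grid (row + d.1) (col + d.2) then
            PySem.Set.add s (pvCell grid (row + d.1) (col + d.2), row + d.1, col + d.2, n)
          else s) s) PySem.Set.empty with hSA
    set SB := (PySem.List.pyRange (row - 1) (row + 2)).foldl (fun s r =>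
        (PySem.List.pyRange (a - 1) (b + 2)).foldl (fun s c =>
          if a == b && r == row && c == a then s
          else if pvIsSymbol grid r c then
            PySem.Set.add s (pvCell grid r c, r, c, n)
          else s) s) PySem.Set.empty with hSB
    -- the two sets have the same members
    have hmem : ∀ x, x ∈ SA ↔ x ∈ SB := by
      intro x
      rw [hSA, hSB, pv_memA, pv_memB]
      constructor
      · rintro ⟨col, hcol, d, hd, hsym, hx⟩
        have hcov := (pv_cov row a b (row + d.1) (col + d.2) hab').mp
          ⟨col, hcol, d, hd, rfl, rfl⟩
        exact ⟨row + d.1, hcov.1, col + d.2, hcov.2.1, hcov.2.2, hsym, hx⟩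
      · rintro ⟨r, hr, c, hc, hns, hsym, hx⟩
        obtain ⟨col, hcol, d, hd, hrd, hcd⟩ :=
          (pv_cov row a b r c hab').mpr ⟨hr, hc, hns⟩
        rw [hrd, hcd] at hsym hx
        exact ⟨col, hcol, d, hd, hsym, hx⟩
    -- both are duplicate-free
    have hndA : SA.Nodup := by
      rw [hSA]
      refine pv_nodup_foldl _ (fun s col hsn => ?_) _ _ (List.nodup_nil)
      exact pv_nodup_if_add _ _ _ _ hsn
    have hndB : SB.Nodup := by
      rw [hSB]
      refine pv_nodup_foldl _ (fun s r hsn => ?_) _ _ (List.nodup_nil)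
      refine pv_nodup_foldl _ (fun s c hsn' => ?_) _ _ hsn
      by_cases h1 : (a == b && r == row && c == a) = true
      · rw [if_pos h1]; exact hsn'
      · rw [if_neg h1]
        by_cases h2 : pvIsSymbol grid r c = true
        · rw [if_pos h2]; exact PySem.Set.nodup_add s (pvCell grid r c, r, c, n) hsn'
        · rw [if_neg h2]; exact hsn'
    -- hence they are permutations of each other
    have hperm : SA.Perm SB :=
      List.perm_of_nodup_nodup_toFinset_eq hndA hndB
        (Finset.ext (by intro x; simp only [List.mem_toFinset]; exact hmem x))
    -- the key is injective on SA's members (their shape is pvTup with bounded coordinates)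
    have hnd : (SA.map pvKey).Nodup := by
      refine List.Nodup.map_on ?_ hndA
      intro x hx y hy hkey
      obtain ⟨colx, hcolx, dx', hdx, -, hxe⟩ := (pv_memA grid n row a b x).mp (hSA ▸ hx)
      obtain ⟨coly, hcoly, dy', hdy, -, hye⟩ := (pv_memA grid n row a b y).mp (hSA ▸ hy)
      have hbd : ∀ d ∈ pvOffsets, -1 ≤ d.1 ∧ d.1 ≤ 1 ∧ -1 ≤ d.2 ∧ d.2 ≤ 1 := by decide
      obtain ⟨hx1, hx2, hx3, hx4⟩ := hbd _ hdx
      obtain ⟨hy1, hy2, hy3, hy4⟩ := hbd _ hdy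
      rw [hxe, hye] at hkey ⊢
      simp only [pvTup, pvKey] at hkey ⊢
      have : row + dx'.1 = row + dy'.1 ∧ colx + dx'.2 = coly + dy'.2 := by omega
      rw [this.1, this.2]
    exact pv_sorted_eq pvKey SA SB hperm hnd
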